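-- pv_equiv track=rewrite | github.com/dataengineerankur/dms-snowpipe-dbt-airflow | airflow/dashboard/app.py | detect_table
-- ===== SOURCE A (Python) =====
-- def detect_table(payload: dict) -> str:
--     keys = set(str(k).lower() for k in payload.keys())
--     if "customerid" in keys:   return "CUSTOMERS"
--     if "productid"  in keys:   return "PRODUCTS"
--     if "orderitemid" in keys:  return "ORDER_ITEMS"
--     if "orderid"    in keys:   return "ORDERS"
--     if "categoryid" in keys:   return "CATEGORIES"
--     if "employeeid" in keys:   return "ERP_EMPLOYEES"
--     if "deptid"     in keys:   return "ERP_DEPARTMENTS"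
--     if "runid"      in keys:   return "ERP_PAYROLL_RUNS"
--     if "lineid"     in keys:   return "ERP_PAYROLL_LINES"
--     if "accountid"  in keys:   return "CRM_ACCOUNTS"
--     if "contactid"  in keys:   return "CRM_CONTACTS"
--     if "oppid"      in keys:   return "CRM_OPPORTUNITIES"
--     if "whid"       in keys:   return "INV_WAREHOUSES"
--     if "skuid"      in keys:   return "INV_SKU"
--     if "movid"      in keys:   return "INV_STOCK_MOVEMENTS"
--     return "UNKNOWN"
-- ===== SOURCE B (Python) =====
-- _PRIO = {
--     "customerid": (0, "CUSTOMERS"),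
--     "productid": (1, "PRODUCTS"),
--     "orderitemid": (2, "ORDER_ITEMS"),
--     "orderid": (3, "ORDERS"),
--     "categoryid": (4, "CATEGORIES"),
--     "employeeid": (5, "ERP_EMPLOYEES"),
--     "deptid": (6, "ERP_DEPARTMENTS"),
--     "runid": (7, "ERP_PAYROLL_RUNS"),
--     "lineid": (8, "ERP_PAYROLL_LINES"),
--     "accountid": (9, "CRM_ACCOUNTS"),
--     "contactid": (10, "CRM_CONTACTS"),
--     "oppid": (11, "CRM_OPPORTUNITIES"),
--     "whid": (12, "INV_WAREHOUSES"),
--     "skuid": (13, "INV_SKU"),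
--     "movid": (14, "INV_STOCK_MOVEMENTS"),
-- }
--
--
-- def detect_table(payload: dict) -> str:
--     best = None
--     for k in payload.keys():
--         hit = _PRIO.get(str(k).lower())
--         if hit is not None and (best is None or hit[0] < best[0]):
--             best = hit
--     return best[1] if best is not None else "UNKNOWN"
-- ===== Notes on version B (the rewrite author's own statement) =====
-- stated objective: alternative
-- what changed: A lowercases all keys into a set and probes 15 fixed key names in a hard-coded if-cascade; B builds a dictionary mapping each priority key to a (rank, table) pair and makes a single pass over the actual payload keys, keeping the match with the lowest rank.
import Mathlib
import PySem

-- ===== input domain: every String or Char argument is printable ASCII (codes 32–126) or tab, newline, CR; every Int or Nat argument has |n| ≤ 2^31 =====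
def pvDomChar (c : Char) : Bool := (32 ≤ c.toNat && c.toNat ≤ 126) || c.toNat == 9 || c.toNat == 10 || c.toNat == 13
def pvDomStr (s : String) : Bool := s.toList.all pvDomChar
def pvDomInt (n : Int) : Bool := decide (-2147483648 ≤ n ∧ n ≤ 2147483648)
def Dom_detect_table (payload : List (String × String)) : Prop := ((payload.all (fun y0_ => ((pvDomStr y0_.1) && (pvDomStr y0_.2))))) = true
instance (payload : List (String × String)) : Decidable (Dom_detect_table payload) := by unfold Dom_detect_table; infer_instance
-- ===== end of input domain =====

-- B replaces A's fixed cascade of 15 set-membership probes by a priority dictionary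
-- (key -> (rank, table)) and a single pass over the payload keys keeping the best (lowest) rank.

-- ===== PORT A =====
def detect_table (payload : List (String × String)) : String :=
  let keys : PySem.Set String := PySem.Set.ofList (payload.map (fun p => PySem.Str.lower p.1))
  if PySem.Set.contains keys "customerid" then "CUSTOMERS"
  else if PySem.Set.contains keys "productid" then "PRODUCTS"
  else if PySem.Set.contains keys "orderitemid" then "ORDER_ITEMS"
  else if PySem.Set.contains keys "orderid" then "ORDERS"
  else if PySem.Set.contains keys "categoryid" then "CATEGORIES"
  else if PySem.Set.contains keys "employeeid" then "ERP_EMPLOYEES"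
  else if PySem.Set.contains keys "deptid" then "ERP_DEPARTMENTS"
  else if PySem.Set.contains keys "runid" then "ERP_PAYROLL_RUNS"
  else if PySem.Set.contains keys "lineid" then "ERP_PAYROLL_LINES"
  else if PySem.Set.contains keys "accountid" then "CRM_ACCOUNTS"
  else if PySem.Set.contains keys "contactid" then "CRM_CONTACTS"
  else if PySem.Set.contains keys "oppid" then "CRM_OPPORTUNITIES"
  else if PySem.Set.contains keys "whid" then "INV_WAREHOUSES"
  else if PySem.Set.contains keys "skuid" then "INV_SKU"
  else if PySem.Set.contains keys "movid" then "INV_STOCK_MOVEMENTS"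
  else "UNKNOWN"

-- ===== PORT B =====
def prioDict : PySem.Dict String (Nat × String) :=
  PySem.Dict.ofList [
    ("customerid", (0, "CUSTOMERS")),
    ("productid", (1, "PRODUCTS")),
    ("orderitemid", (2, "ORDER_ITEMS")),
    ("orderid", (3, "ORDERS")),
    ("categoryid", (4, "CATEGORIES")),
    ("employeeid", (5, "ERP_EMPLOYEES")),
    ("deptid", (6, "ERP_DEPARTMENTS")),
    ("runid", (7, "ERP_PAYROLL_RUNS")),
    ("lineid", (8, "ERP_PAYROLL_LINES")),
    ("accountid", (9, "CRM_ACCOUNTS")),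
    ("contactid", (10, "CRM_CONTACTS")),
    ("oppid", (11, "CRM_OPPORTUNITIES")),
    ("whid", (12, "INV_WAREHOUSES")),
    ("skuid", (13, "INV_SKU")),
    ("movid", (14, "INV_STOCK_MOVEMENTS"))
]

-- the body of B's single loop over the payload keys
def detectStep (best : Option (Nat × String)) (p : String × String) : Option (Nat × String) :=
  match PySem.Dict.get? prioDict (PySem.Str.lower p.1) with
  | none => best
  | some hit =>
    match best with
    | none => some hit
    | some b => if hit.1 < b.1 then some hit else best

def detect_table_alt (payload : List (String × String)) : String :=
  match payload.foldl detectStep none with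
  | some b => b.2
  | none => "UNKNOWN"

-- ===== PRECONDITION & SPEC =====
def Spec_detect_table (payload : List (String × String)) (out : String) : Prop := out = detect_table_alt payload
instance (payload : List (String × String)) (out : String) : Decidable (Spec_detect_table payload out) := by unfold Spec_detect_table; infer_instance

-- ===== CLAIM (what is proved, stated in full; the proofs are below) =====
def Claim_equal_detect_table : Prop := ∀ (payload : List (String × String)), Dom_detect_table payload → Spec_detect_table payload (detect_table payload)

-- ===== LEMMAS AND PROOFS =====

-- the priority list with explicit ranks: (rank, key, table)
def prio15 : List (Nat × String × String) := [
    (0, "customerid", "CUSTOMERS"),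
    (1, "productid", "PRODUCTS"),
    (2, "orderitemid", "ORDER_ITEMS"),
    (3, "orderid", "ORDERS"),
    (4, "categoryid", "CATEGORIES"),
    (5, "employeeid", "ERP_EMPLOYEES"),
    (6, "deptid", "ERP_DEPARTMENTS"),
    (7, "runid", "ERP_PAYROLL_RUNS"),
    (8, "lineid", "ERP_PAYROLL_LINES"),
    (9, "accountid", "CRM_ACCOUNTS"),
    (10, "contactid", "CRM_CONTACTS"),
    (11, "oppid", "CRM_OPPORTUNITIES"),
    (12, "whid", "INV_WAREHOUSES"),
    (13, "skuid", "INV_SKU"),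
    (14, "movid", "INV_STOCK_MOVEMENTS")
]

-- minimum-by-rank on optional (rank, table) pairs, keeping the left argument on ties
def cmin (a b : Option (Nat × String)) : Option (Nat × String) :=
  match a, b with
  | none, b => b
  | some a, none => some a
  | some a, some b => if b.1 < a.1 then some b else some a

def render (o : Option (Nat × String)) : String :=
  match o with
  | some b => b.2
  | none => "UNKNOWN"

-- what a single (already lowered) key contributes: its (rank, table) entry, if any
def gIn (k : String) : List (Nat × String × String) → Option (Nat × String)
  | [] => none
  | e :: l => if e.2.1 = k then some (e.1, e.2.2) else gIn k l

-- A's cascade over an abstract priority list, returning the (rank, table) entry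
def firstIn (ks : List String) : List (Nat × String × String) → Option (Nat × String)
  | [] => none
  | e :: l => if ks.contains e.2.1 then some (e.1, e.2.2) else firstIn ks l

-- A's cascade over an abstract priority list, returning the table name
def chainIn (ks : List String) : List (Nat × String × String) → String
  | [] => "UNKNOWN"
  | e :: l => if ks.contains e.2.1 then e.2.2 else chainIn ks l

-- B's loop body on an already-lowered key
def f2 (best : Option (Nat × String)) (k : String) : Option (Nat × String) :=
  match PySem.Dict.get? prioDict k with
  | none => best
  | some hit =>
    match best with
    | none => some hit
    | some b => if hit.1 < b.1 then some hit else best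

lemma prioItems : prioDict.items = prio15.map (fun e => (e.2.1, (e.1, e.2.2))) := by rfl

lemma find?_eq_gIn (k : String) (l : List (Nat × String × String)) :
    Option.map (fun x => x.2)
      (List.find? (fun p => p.1 == k) (l.map (fun e => (e.2.1, (e.1, e.2.2))))) = gIn k l := by
  induction l with
  | nil => rfl
  | cons e l ih =>
    simp only [List.map_cons, List.find?_cons]
    by_cases h : e.2.1 = k
    · simp [gIn, h]
    · rw [show (((e.2.1, (e.1, e.2.2)) : String × Nat × String).1 == k) = false by simp [h]]
      simp only [gIn, if_neg h]
      exact ih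

lemma get?_prio (k : String) : PySem.Dict.get? prioDict k = gIn k prio15 := by
  rw [← find?_eq_gIn k prio15, ← prioItems]
  rfl

lemma f2_eq_cmin (best : Option (Nat × String)) (k : String) :
    f2 best k = cmin best (gIn k prio15) := by
  rw [show gIn k prio15 = PySem.Dict.get? prioDict k from (get?_prio k).symm]
  rcases h : PySem.Dict.get? prioDict k with _ | hit <;>
    rcases best with _ | b <;> simp [f2, cmin, h]

lemma cmin_none_left (b : Option (Nat × String)) : cmin none b = b := by
  rcases b <;> rfl

lemma cmin_none_right (a : Option (Nat × String)) : cmin a none = a := by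
  rcases a <;> rfl

lemma cmin_assoc (a b c : Option (Nat × String)) :
    cmin (cmin a b) c = cmin a (cmin b c) := by
  rcases a with _ | a
  · rw [cmin_none_left, cmin_none_left]
  · rcases b with _ | b
    · rw [cmin_none_right, cmin_none_left]
    · rcases c with _ | c
      · rw [cmin_none_right, cmin_none_right]
      · by_cases h1 : b.1 < a.1 <;> by_cases h2 : c.1 < b.1 <;> by_cases h3 : c.1 < a.1 <;>
          simp [cmin, h1, h2, h3] <;> omega

lemma foldl_f2_factor (ks : List String) (acc : Option (Nat × String)) :
    ks.foldl f2 acc = cmin acc (ks.foldl f2 none) := by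
  induction ks generalizing acc with
  | nil => rcases acc <;> rfl
  | cons k ks ih =>
    simp only [List.foldl_cons]
    rw [ih (f2 acc k), ih (f2 none k), f2_eq_cmin acc k, f2_eq_cmin none k,
        cmin_none_left, cmin_assoc]

lemma gIn_rank (k : String) (l : List (Nat × String × String)) (r : Nat)
    (h : ∀ e ∈ l, r ≤ e.1) : ∀ b, gIn k l = some b → r ≤ b.1 := by
  induction l with
  | nil => intro b hb; simp [gIn] at hb
  | cons e l ih =>
    intro b hb
    by_cases he : e.2.1 = k
    · rw [show gIn k (e :: l) = if e.2.1 = k then some (e.1, e.2.2) else gIn k l from rfl,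
          if_pos he] at hb
      cases hb
      exact h e (by simp)
    · rw [show gIn k (e :: l) = if e.2.1 = k then some (e.1, e.2.2) else gIn k l from rfl,
          if_neg he] at hb
      exact ih (fun e' he' => h e' (by simp [he'])) b hb

lemma firstIn_rank (ks : List String) (l : List (Nat × String × String)) (r : Nat)
    (h : ∀ e ∈ l, r ≤ e.1) : ∀ b, firstIn ks l = some b → r ≤ b.1 := by
  induction l with
  | nil => intro b hb; simp [firstIn] at hb
  | cons e l ih =>
    intro b hb
    rw [show firstIn ks (e :: l)
          = if ks.contains e.2.1 then some (e.1, e.2.2) else firstIn ks l from rfl] at hb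
    by_cases he : ks.contains e.2.1 = true
    · rw [if_pos he] at hb
      cases hb
      exact h e (by simp)
    · rw [if_neg he] at hb
      exact ih (fun e' he' => h e' (by simp [he'])) b hb

lemma firstIn_cons (k : String) (ks : List String) (l : List (Nat × String × String))
    (hs : l.Pairwise (fun a b => a.1 < b.1)) :
    firstIn (k :: ks) l = cmin (gIn k l) (firstIn ks l) := by
  induction l with
  | nil => rfl
  | cons e l ih =>
    have hlt : ∀ e' ∈ l, e.1 + 1 ≤ e'.1 := by
      intro e' he'
      have := (List.pairwise_cons.mp hs).1 e' he'
      omega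
    have hs' := (List.pairwise_cons.mp hs).2
    rw [show firstIn (k :: ks) (e :: l)
          = if (k :: ks).contains e.2.1 then some (e.1, e.2.2) else firstIn (k :: ks) l from rfl,
        show gIn k (e :: l) = if e.2.1 = k then some (e.1, e.2.2) else gIn k l from rfl,
        show firstIn ks (e :: l)
          = if ks.contains e.2.1 then some (e.1, e.2.2) else firstIn ks l from rfl]
    by_cases he : e.2.1 = k
    · -- the head key equals the new payload key: the head's rank beats
      -- everything the old payload can match in e :: l
      have hc : ((k :: ks).contains e.2.1) = true := by simp [he]
      rw [if_pos hc, if_pos he]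
      rcases hf : (if ks.contains e.2.1 = true then some (e.1, e.2.2) else firstIn ks l)
        with _ | b
      · rfl
      · have hb : e.1 ≤ b.1 := by
          by_cases hks : ks.contains e.2.1 = true
          · rw [if_pos hks] at hf
            cases hf
            exact le_refl _
          · rw [if_neg hks] at hf
            exact firstIn_rank ks l e.1 (fun e' he' => by have := hlt e' he'; omega) b hf
        simp only [cmin]
        rw [if_neg (by omega)]
    · have hcc : ((k :: ks).contains e.2.1) = (ks.contains e.2.1) := by
        simp [he]
      rw [if_neg he, hcc]
      by_cases hks : ks.contains e.2.1 = true
      · -- the old payload matches the head: rank e.1 beats every later rank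
        rw [if_pos hks, if_pos hks]
        rcases hg : gIn k l with _ | g
        · rw [cmin_none_left]
        · have hr : e.1 + 1 ≤ g.1 := gIn_rank k l (e.1 + 1) hlt g hg
          simp only [cmin]
          rw [if_pos (by omega)]
      · rw [if_neg hks, if_neg hks]
        exact ih hs'

lemma prio15_sorted : prio15.Pairwise (fun a b => a.1 < b.1) := by decide

lemma foldl_f2_eq (ks : List String) : ks.foldl f2 none = firstIn ks prio15 := by
  induction ks with
  | nil => rfl
  | cons k ks ih =>
    simp only [List.foldl_cons]
    rw [foldl_f2_factor, f2_eq_cmin none k, cmin_none_left, ih,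
        firstIn_cons k ks prio15 prio15_sorted]

lemma render_firstIn (ks : List String) (l : List (Nat × String × String)) :
    render (firstIn ks l) = chainIn ks l := by
  induction l with
  | nil => rfl
  | cons e l ih =>
    rw [show firstIn ks (e :: l)
          = if ks.contains e.2.1 then some (e.1, e.2.2) else firstIn ks l from rfl,
        show chainIn ks (e :: l)
          = if ks.contains e.2.1 then e.2.2 else chainIn ks l from rfl]
    by_cases he : ks.contains e.2.1 = true
    · rw [if_pos he, if_pos he]
      rfl
    · rw [if_neg he, if_neg he]
      exact ih

lemma detect_table_eq_chainIn (payload : List (String × String)) :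
    detect_table payload
      = chainIn (payload.map (fun p => PySem.Str.lower p.1)) prio15 := by
  have hc : ∀ x, PySem.Set.contains
      (PySem.Set.ofList (payload.map (fun p => PySem.Str.lower p.1))) x
        = (payload.map (fun p => PySem.Str.lower p.1)).contains x := fun x => by
    simp only [PySem.Set.contains_eq_listContains, List.contains_eq_mem, PySem.Set.mem_ofList]
  simp only [detect_table, hc]
  rfl

lemma detect_table_alt_eq (payload : List (String × String)) :
    detect_table_alt payload = render (payload.foldl detectStep none) := by
  rfl

lemma foldl_detectStep (payload : List (String × String)) :
    payload.foldl detectStep none = (payload.map (fun p => PySem.Str.lower p.1)).foldl f2 none := by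
  rw [List.foldl_map]
  rfl

-- ===== VERDICT (by name: the statement is the Claim_ definition above) =====
theorem detect_table_spec : Claim_equal_detect_table := by
  intro payload _
  unfold Spec_detect_table
  rw [detect_table_alt_eq, foldl_detectStep, foldl_f2_eq, render_firstIn,
      detect_table_eq_chainIn]
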